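-- pv_equiv track=rewrite | github.com/efabless/cace | cace/common/cace_read.py | specchar_sub
-- ===== SOURCE A (Python) =====
-- def specchar_sub(string):
--     ucode_list = [
--         '\u00b5',
--         '\u00b0',
--         '\u03c3',
--         '\u03a9',
--         '\u00b2',
--         '\u221a',
--         '\u03c1',
--     ]
--     text_list = [
--         '{micro}',
--         '{degrees}',
--         '{sigma}',
--         '{ohms}',
--         '{squared}',
--         '{sqrt}',
--         '{rho}',
--     ]
--
--     if '{' not in string:
--         return string
--
--     idx = 0
--     for item in text_list:
--         if item in string:
--             string = string.replace(item, ucode_list[idx])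
--         idx = idx + 1
--
--     return string
-- ===== SOURCE B (Python) =====
-- def specchar_sub(string):
--     mapping = {
--         '{micro}': '\u00b5',
--         '{degrees}': '\u00b0',
--         '{sigma}': '\u03c3',
--         '{ohms}': '\u03a9',
--         '{squared}': '\u00b2',
--         '{sqrt}': '\u221a',
--         '{rho}': '\u03c1',
--     }
--     if '{' not in string:
--         return string
--     out = []
--     i = 0
--     n = len(string)
--     while i < n:
--         if string[i] == '{':
--             for tok, ch in mapping.items():
--                 if string.startswith(tok, i):
--                     out.append(ch)
--                     i += len(tok)
--                     break
--             else:
--                 out.append(string[i])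
--                 i += 1
--         else:
--             out.append(string[i])
--             i += 1
--     return ''.join(out)
-- ===== Notes on version B (the rewrite author's own statement) =====
-- stated objective: alternative
-- what changed: Replaces the seven sequential whole-string str.replace passes with a single left-to-right scan that looks each placeholder token up in a dict and emits its unicode char directly.
import Mathlib
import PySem

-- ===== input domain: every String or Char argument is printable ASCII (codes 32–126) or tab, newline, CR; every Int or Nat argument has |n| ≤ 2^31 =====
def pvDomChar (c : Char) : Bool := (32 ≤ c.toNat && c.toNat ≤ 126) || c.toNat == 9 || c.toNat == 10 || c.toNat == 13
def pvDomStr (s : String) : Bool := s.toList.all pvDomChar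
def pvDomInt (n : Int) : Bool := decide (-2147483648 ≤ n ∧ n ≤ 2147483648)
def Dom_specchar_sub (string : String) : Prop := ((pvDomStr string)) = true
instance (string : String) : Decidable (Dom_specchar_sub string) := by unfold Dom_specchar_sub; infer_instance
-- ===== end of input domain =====

-- B replaces A's seven sequential str.replace passes by one left-to-right scan with a
-- placeholder→char lookup table (objective: alternative; same result, one pass).

-- ===== PORT A =====
-- literal transliteration of A: the guard, then a for-loop over text_list with an idx
-- counter, replacing each placeholder that occurs.  ucode_list[idx] is always in range,
-- so the pyGet? lookup's .getD "" default is never taken.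
def specchar_sub (string : String) : String :=
  let ucode_list : List String := ["\u00b5", "\u00b0", "\u03c3", "\u03a9", "\u00b2", "\u221a", "\u03c1"]
  let text_list : List String := ["{micro}", "{degrees}", "{sigma}", "{ohms}", "{squared}", "{sqrt}", "{rho}"]
  if PySem.Str.isIn "{" string = false then string
  else
    (text_list.foldl
      (fun (st : String × Int) item =>
        ((if PySem.Str.isIn item st.1 then
            PySem.Str.replace st.1 item ((PySem.List.pyGet? ucode_list st.2).getD "")
          else st.1), st.2 + 1))
      (string, (0 : Int))).1

-- ===== PORT B =====
-- helpers for port B: the dict of Source B as an association list (insertion order)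
def pvT1 : List Char := ['{','m','i','c','r','o','}']
def pvT2 : List Char := ['{','d','e','g','r','e','e','s','}']
def pvT3 : List Char := ['{','s','i','g','m','a','}']
def pvT4 : List Char := ['{','o','h','m','s','}']
def pvT5 : List Char := ['{','s','q','u','a','r','e','d','}']
def pvT6 : List Char := ['{','s','q','r','t','}']
def pvT7 : List Char := ['{','r','h','o','}']

def pvMapping : List (List Char × Char) :=
  [(pvT1, '\u00b5'), (pvT2, '\u00b0'), (pvT3, '\u03c3'), (pvT4, '\u03a9'),
   (pvT5, '\u00b2'), (pvT6, '\u221a'), (pvT7, '\u03c1')]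

-- Source B's while-loop over the index i, ported as structural recursion over the remaining
-- characters (exact: i advances by 1 or by len(tok)); string.startswith(tok, i) is
-- isPrefixOf on the remainder, dict iteration order is pvMapping's list order.
def pvScan : List Char → List Char
  | [] => []
  | c :: s =>
    if c = '{' then
      match pvMapping.find? (fun p => p.1.isPrefixOf (c :: s)) with
      | some (tok, ch) => ch :: pvScan (List.drop (tok.length - 1) s)
      | none => c :: pvScan s
    else c :: pvScan s
termination_by l => l.length
decreasing_by
  all_goals simp

def specchar_sub_alt (string : String) : String :=
  if PySem.Str.isIn "{" string = false then string
  else String.ofList (pvScan string.toList)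

-- ===== PRECONDITION & SPEC =====
def Spec_specchar_sub (string : String) (out : String) : Prop := out = specchar_sub_alt string
instance (string : String) (out : String) : Decidable (Spec_specchar_sub string out) := by unfold Spec_specchar_sub; infer_instance

-- ===== CLAIM (what is proved, stated in full; the proofs are below) =====
def Claim_equal_specchar_sub : Prop := ∀ (string : String), Dom_specchar_sub string → Spec_specchar_sub string (specchar_sub string)

-- ===== LEMMAS AND PROOFS =====

-- Python's s.replace(old, new) for nonempty old and a single replacement char,
-- as a plain structural recursion (proof-side model of PySem.Chars.replace).
def pvRepl (old : List Char) (u : Char) : List Char → List Char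
  | [] => []
  | c :: s =>
    if old.isPrefixOf (c :: s) then u :: pvRepl old u (List.drop (old.length - 1) s)
    else c :: pvRepl old u s
termination_by l => l.length
decreasing_by
  all_goals simp

theorem pvRepl_nil (old : List Char) (u : Char) : pvRepl old u [] = [] := by
  rw [pvRepl.eq_def]

theorem pvRepl_cons_pos (old : List Char) (u c : Char) (s : List Char)
    (h : old.isPrefixOf (c :: s) = true) :
    pvRepl old u (c :: s) = u :: pvRepl old u (List.drop (old.length - 1) s) := by
  rw [pvRepl.eq_def]; simp [h]

theorem pvRepl_cons_neg (old : List Char) (u c : Char) (s : List Char)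
    (h : old.isPrefixOf (c :: s) = false) :
    pvRepl old u (c :: s) = c :: pvRepl old u s := by
  rw [pvRepl.eq_def]; simp [h]

-- bridge: PySem.Chars.replace = pvRepl (nonempty old, single-char replacement)
theorem pvGo_eq (old : List Char) (hne : old ≠ []) (u : Char) :
    ∀ fuel l acc, l.length ≤ fuel →
      PySem.Chars.replace.go old [u] fuel l acc = acc.reverse ++ pvRepl old u l := by
  intro fuel
  induction fuel with
  | zero =>
    intro l acc hl
    have : l = [] := by cases l <;> simp_all
    subst this
    simp [PySem.Chars.replace.go, pvRepl.eq_def]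
  | succ n ih =>
    intro l acc hl
    cases l with
    | nil => simp [PySem.Chars.replace.go, pvRepl.eq_def]
    | cons c t =>
      have ht : t.length ≤ n := by simp at hl; omega
      cases h : old.isPrefixOf (c :: t) with
      | true =>
        rw [PySem.Chars.replace.go]
        simp only [h, if_pos]
        obtain ⟨a, old', rfl⟩ : ∃ a old', old = a :: old' := by
          cases old with
          | nil => exact absurd rfl hne
          | cons a o => exact ⟨a, o, rfl⟩
        have hdrop : List.drop (a :: old').length (c :: t) = List.drop old'.length t := by
          simp
        rw [hdrop, ih _ _ (by simp [List.length_drop]; omega), pvRepl_cons_pos _ _ _ _ h]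
        simp
      | false =>
        rw [PySem.Chars.replace.go]
        simp only [h]
        rw [ih _ _ ht, pvRepl_cons_neg _ _ _ _ h]
        simp

theorem pvReplace_eq (old : List Char) (hne : old ≠ []) (u : Char) (s : List Char) :
    PySem.Chars.replace s old [u] = pvRepl old u s := by
  rw [PySem.Chars.replace]
  simp [List.isEmpty_iff, hne]
  exact pvGo_eq old hne u s.length s [] le_rfl

theorem pvRepl_of_not_infix (old : List Char) (u : Char) (s : List Char)
    (h : ¬ old <:+: s) : pvRepl old u s = s := by
  induction s with
  | nil => exact pvRepl_nil old u
  | cons c t ih =>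
    have hp : old.isPrefixOf (c :: t) = false := by
      rw [Bool.eq_false_iff]
      intro hb
      exact h (List.isPrefixOf_iff_prefix.mp hb).isInfix
    rw [pvRepl_cons_neg _ _ _ _ hp, ih (fun hi => h (hi.trans (List.suffix_cons c t).isInfix))]

theorem pvPrefix_getElem? (l1 l2 : List Char) (h : l1 <+: l2) (m : Nat)
    (hm : m < l1.length) : l1[m]? = l2[m]? := by
  obtain ⟨z, rfl⟩ := h
  exact (List.getElem?_append_left hm).symm

theorem pvRepl_cons_ne (t : List Char) (u c : Char) (s : List Char)
    (ht : t[0]? = some '{') (hc : c ≠ '{') :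
    pvRepl t u (c :: s) = c :: pvRepl t u s := by
  have hp : t.isPrefixOf (c :: s) = false := by
    rw [Bool.eq_false_iff]
    intro hb
    have h0 : (0 : Nat) < t.length := by
      cases t with
      | nil => simp at ht
      | cons a t' => simp
    have := pvPrefix_getElem? t (c :: s) (List.isPrefixOf_iff_prefix.mp hb) 0 h0
    rw [ht] at this
    simp at this
    exact hc this.symm
  exact pvRepl_cons_neg _ _ _ _ hp

theorem pvRepl_append_noMatch (t : List Char) (u : Char) (p r : List Char)
    (h : ∀ k, k < p.length → ∃ m, m < t.length ∧ k + m < p.length ∧ t[m]? ≠ p[k + m]?) :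
    pvRepl t u (p ++ r) = p ++ pvRepl t u r := by
  induction p with
  | nil => simp
  | cons c p' ih =>
    have hp : t.isPrefixOf (c :: (p' ++ r)) = false := by
      rw [Bool.eq_false_iff]
      intro hb
      obtain ⟨m, hm, hmp, hne⟩ := h 0 (by simp)
      have heq := pvPrefix_getElem? t ((c :: p') ++ r) (by simpa using List.isPrefixOf_iff_prefix.mp hb) m hm
      rw [List.getElem?_append_left (by simpa using hmp)] at heq
      simp only [Nat.zero_add] at hne
      exact hne heq
    rw [List.cons_append, pvRepl_cons_neg _ _ _ _ hp]
    rw [ih]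
    · simp
    · intro k hk
      obtain ⟨m, hm, hmp, hne⟩ := h (k + 1) (by simp; omega)
      refine ⟨m, hm, by simp at hmp; omega, ?_⟩
      have : (c :: p')[k + 1 + m]? = p'[k + m]? := by
        have : k + 1 + m = (k + m) + 1 := by omega
        rw [this]
        simp
      rw [this] at hne
      exact hne

theorem pvRepl_token_head (a : Char) (t : List Char) (u : Char) (r : List Char) :
    pvRepl (a :: t) u ((a :: t) ++ r) = u :: pvRepl (a :: t) u r := by
  have hp : (a :: t).isPrefixOf ((a :: t) ++ r) = true := by
    rw [List.isPrefixOf_iff_prefix]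
    exact List.prefix_append _ _
  rw [List.cons_append, pvRepl_cons_pos _ _ _ _ (by simpa using hp)]
  simp

theorem pvPrefix_repl (t : List Char) (u : Char) :
    ∀ n s w, s.length ≤ n → w <+: pvRepl t u s → u ∉ w → w <+: s := by
  intro n
  induction n with
  | zero =>
    intro s w hs hw hu
    have : s = [] := by cases s <;> simp_all
    subst this
    rw [pvRepl_nil] at hw
    simpa [List.prefix_nil.mp hw] using hw
  | succ n ih =>
    intro s w hs hw hu
    cases s with
    | nil =>
      rw [pvRepl_nil] at hw
      simpa [List.prefix_nil.mp hw] using hw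
    | cons c s' =>
      have hs' : s'.length ≤ n := by simp at hs; omega
      cases h : t.isPrefixOf (c :: s') with
      | true =>
        rw [pvRepl_cons_pos _ _ _ _ h] at hw
        cases w with
        | nil => exact List.nil_prefix
        | cons d w' =>
          rw [List.cons_prefix_cons] at hw
          exact absurd hw.1 (by intro he; exact hu (by simp [he]))
      | false =>
        rw [pvRepl_cons_neg _ _ _ _ h] at hw
        cases w with
        | nil => exact List.nil_prefix
        | cons d w' =>
          rw [List.cons_prefix_cons] at hw ⊢
          exact ⟨hw.1, ih s' w' hs' hw.2 (fun hm => hu (List.mem_cons_of_mem _ hm))⟩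

theorem pvNotPre_lift (t : List Char) (u : Char) (w : List Char) (c : Char) (x : List Char)
    (h : ¬ w <+: c :: x) (hu : u ∉ w) : ¬ w <+: c :: pvRepl t u x := by
  intro hw
  apply h
  cases w with
  | nil => exact List.nil_prefix
  | cons d w' =>
    rw [List.cons_prefix_cons] at hw ⊢
    exact ⟨hw.1, pvPrefix_repl t u x.length x w' le_rfl hw.2 (fun hm => hu (List.mem_cons_of_mem _ hm))⟩


-- A's seven sequential replaces, composed
def pvF (s : List Char) : List Char :=
  pvRepl pvT7 '\u03c1' (pvRepl pvT6 '\u221a' (pvRepl pvT5 '\u00b2' (pvRepl pvT4 '\u03a9'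
    (pvRepl pvT3 '\u03c3' (pvRepl pvT2 '\u00b0' (pvRepl pvT1 '\u00b5' s))))))

theorem pvRepl_head (t : List Char) (u : Char) (X : List Char) (ht : t ≠ []) :
    pvRepl t u (t ++ X) = u :: pvRepl t u X := by
  cases t with
  | nil => exact absurd rfl ht
  | cons a t' => exact pvRepl_token_head a t' u X

theorem pvMain : ∀ n s, s.length ≤ n → pvF s = pvScan s := by
  intro n
  induction n with
  | zero =>
    intro s hs
    have : s = [] := by cases s <;> simp_all
    subst this
    rw [pvScan.eq_def]
    simp [pvF, pvRepl_nil]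
  | succ n ih =>
    intro s hs
    cases s with
    | nil => rw [pvScan.eq_def]; simp [pvF, pvRepl_nil]
    | cons c s' =>
      have hs' : s'.length ≤ n := by simp at hs; omega
      by_cases hc : c = '{'
      · subst hc
        cases hb1 : pvT1.isPrefixOf ('{' :: s') with
        | true =>
          obtain ⟨r, rfl⟩ := (show ['m','i','c','r','o','}'] <+: s' by simpa [pvT1] using List.isPrefixOf_iff_prefix.mp hb1)
          have hr0 : ('{' :: (['m','i','c','r','o','}'] ++ r)) = pvT1 ++ r := rfl
          rw [hr0]
          have hr : r.length ≤ n := by simp at hs'; omega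
          simp only [pvF]
          rw [pvRepl_head pvT1 '\u00b5' _ (by decide)]
          rw [pvRepl_cons_ne pvT2 '\u00b0' '\u00b5' _ (by decide) (by decide)]
          rw [pvRepl_cons_ne pvT3 '\u03c3' '\u00b5' _ (by decide) (by decide)]
          rw [pvRepl_cons_ne pvT4 '\u03a9' '\u00b5' _ (by decide) (by decide)]
          rw [pvRepl_cons_ne pvT5 '\u00b2' '\u00b5' _ (by decide) (by decide)]
          rw [pvRepl_cons_ne pvT6 '\u221a' '\u00b5' _ (by decide) (by decide)]
          rw [pvRepl_cons_ne pvT7 '\u03c1' '\u00b5' _ (by decide) (by decide)]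
          rw [pvScan.eq_def]
          simp [pvMapping, pvT1, pvT2, pvT3, pvT4, pvT5, pvT6, pvT7, List.find?, List.isPrefixOf]
          exact ih r hr
        | false =>
          cases hb2 : pvT2.isPrefixOf ('{' :: s') with
          | true =>
            obtain ⟨r, rfl⟩ := (show ['d','e','g','r','e','e','s','}'] <+: s' by simpa [pvT2] using List.isPrefixOf_iff_prefix.mp hb2)
            have hr0 : ('{' :: (['d','e','g','r','e','e','s','}'] ++ r)) = pvT2 ++ r := rfl
            rw [hr0]
            have hr : r.length ≤ n := by simp at hs'; omega
            simp only [pvF]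
            rw [pvRepl_append_noMatch pvT1 '\u00b5' pvT2 _ (by decide)]
            rw [pvRepl_head pvT2 '\u00b0' _ (by decide)]
            rw [pvRepl_cons_ne pvT3 '\u03c3' '\u00b0' _ (by decide) (by decide)]
            rw [pvRepl_cons_ne pvT4 '\u03a9' '\u00b0' _ (by decide) (by decide)]
            rw [pvRepl_cons_ne pvT5 '\u00b2' '\u00b0' _ (by decide) (by decide)]
            rw [pvRepl_cons_ne pvT6 '\u221a' '\u00b0' _ (by decide) (by decide)]
            rw [pvRepl_cons_ne pvT7 '\u03c1' '\u00b0' _ (by decide) (by decide)]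
            rw [pvScan.eq_def]
            simp [pvMapping, pvT1, pvT2, pvT3, pvT4, pvT5, pvT6, pvT7, List.find?, List.isPrefixOf]
            exact ih r hr
          | false =>
            cases hb3 : pvT3.isPrefixOf ('{' :: s') with
            | true =>
              obtain ⟨r, rfl⟩ := (show ['s','i','g','m','a','}'] <+: s' by simpa [pvT3] using List.isPrefixOf_iff_prefix.mp hb3)
              have hr0 : ('{' :: (['s','i','g','m','a','}'] ++ r)) = pvT3 ++ r := rfl
              rw [hr0]
              have hr : r.length ≤ n := by simp at hs'; omega
              simp only [pvF]
              rw [pvRepl_append_noMatch pvT1 '\u00b5' pvT3 _ (by decide)]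
              rw [pvRepl_append_noMatch pvT2 '\u00b0' pvT3 _ (by decide)]
              rw [pvRepl_head pvT3 '\u03c3' _ (by decide)]
              rw [pvRepl_cons_ne pvT4 '\u03a9' '\u03c3' _ (by decide) (by decide)]
              rw [pvRepl_cons_ne pvT5 '\u00b2' '\u03c3' _ (by decide) (by decide)]
              rw [pvRepl_cons_ne pvT6 '\u221a' '\u03c3' _ (by decide) (by decide)]
              rw [pvRepl_cons_ne pvT7 '\u03c1' '\u03c3' _ (by decide) (by decide)]
              rw [pvScan.eq_def]
              simp [pvMapping, pvT1, pvT2, pvT3, pvT4, pvT5, pvT6, pvT7, List.find?, List.isPrefixOf]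
              exact ih r hr
            | false =>
              cases hb4 : pvT4.isPrefixOf ('{' :: s') with
              | true =>
                obtain ⟨r, rfl⟩ := (show ['o','h','m','s','}'] <+: s' by simpa [pvT4] using List.isPrefixOf_iff_prefix.mp hb4)
                have hr0 : ('{' :: (['o','h','m','s','}'] ++ r)) = pvT4 ++ r := rfl
                rw [hr0]
                have hr : r.length ≤ n := by simp at hs'; omega
                simp only [pvF]
                rw [pvRepl_append_noMatch pvT1 '\u00b5' pvT4 _ (by decide)]
                rw [pvRepl_append_noMatch pvT2 '\u00b0' pvT4 _ (by decide)]
                rw [pvRepl_append_noMatch pvT3 '\u03c3' pvT4 _ (by decide)]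
                rw [pvRepl_head pvT4 '\u03a9' _ (by decide)]
                rw [pvRepl_cons_ne pvT5 '\u00b2' '\u03a9' _ (by decide) (by decide)]
                rw [pvRepl_cons_ne pvT6 '\u221a' '\u03a9' _ (by decide) (by decide)]
                rw [pvRepl_cons_ne pvT7 '\u03c1' '\u03a9' _ (by decide) (by decide)]
                rw [pvScan.eq_def]
                simp [pvMapping, pvT1, pvT2, pvT3, pvT4, pvT5, pvT6, pvT7, List.find?, List.isPrefixOf]
                exact ih r hr
              | false =>
                cases hb5 : pvT5.isPrefixOf ('{' :: s') with
                | true =>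
                  obtain ⟨r, rfl⟩ := (show ['s','q','u','a','r','e','d','}'] <+: s' by simpa [pvT5] using List.isPrefixOf_iff_prefix.mp hb5)
                  have hr0 : ('{' :: (['s','q','u','a','r','e','d','}'] ++ r)) = pvT5 ++ r := rfl
                  rw [hr0]
                  have hr : r.length ≤ n := by simp at hs'; omega
                  simp only [pvF]
                  rw [pvRepl_append_noMatch pvT1 '\u00b5' pvT5 _ (by decide)]
                  rw [pvRepl_append_noMatch pvT2 '\u00b0' pvT5 _ (by decide)]
                  rw [pvRepl_append_noMatch pvT3 '\u03c3' pvT5 _ (by decide)]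
                  rw [pvRepl_append_noMatch pvT4 '\u03a9' pvT5 _ (by decide)]
                  rw [pvRepl_head pvT5 '\u00b2' _ (by decide)]
                  rw [pvRepl_cons_ne pvT6 '\u221a' '\u00b2' _ (by decide) (by decide)]
                  rw [pvRepl_cons_ne pvT7 '\u03c1' '\u00b2' _ (by decide) (by decide)]
                  rw [pvScan.eq_def]
                  simp [pvMapping, pvT1, pvT2, pvT3, pvT4, pvT5, pvT6, pvT7, List.find?, List.isPrefixOf]
                  exact ih r hr
                | false =>
                  cases hb6 : pvT6.isPrefixOf ('{' :: s') with
                  | true =>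
                    obtain ⟨r, rfl⟩ := (show ['s','q','r','t','}'] <+: s' by simpa [pvT6] using List.isPrefixOf_iff_prefix.mp hb6)
                    have hr0 : ('{' :: (['s','q','r','t','}'] ++ r)) = pvT6 ++ r := rfl
                    rw [hr0]
                    have hr : r.length ≤ n := by simp at hs'; omega
                    simp only [pvF]
                    rw [pvRepl_append_noMatch pvT1 '\u00b5' pvT6 _ (by decide)]
                    rw [pvRepl_append_noMatch pvT2 '\u00b0' pvT6 _ (by decide)]
                    rw [pvRepl_append_noMatch pvT3 '\u03c3' pvT6 _ (by decide)]
                    rw [pvRepl_append_noMatch pvT4 '\u03a9' pvT6 _ (by decide)]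
                    rw [pvRepl_append_noMatch pvT5 '\u00b2' pvT6 _ (by decide)]
                    rw [pvRepl_head pvT6 '\u221a' _ (by decide)]
                    rw [pvRepl_cons_ne pvT7 '\u03c1' '\u221a' _ (by decide) (by decide)]
                    rw [pvScan.eq_def]
                    simp [pvMapping, pvT1, pvT2, pvT3, pvT4, pvT5, pvT6, pvT7, List.find?, List.isPrefixOf]
                    exact ih r hr
                  | false =>
                    cases hb7 : pvT7.isPrefixOf ('{' :: s') with
                    | true =>
                      obtain ⟨r, rfl⟩ := (show ['r','h','o','}'] <+: s' by simpa [pvT7] using List.isPrefixOf_iff_prefix.mp hb7)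
                      have hr0 : ('{' :: (['r','h','o','}'] ++ r)) = pvT7 ++ r := rfl
                      rw [hr0]
                      have hr : r.length ≤ n := by simp at hs'; omega
                      simp only [pvF]
                      rw [pvRepl_append_noMatch pvT1 '\u00b5' pvT7 _ (by decide)]
                      rw [pvRepl_append_noMatch pvT2 '\u00b0' pvT7 _ (by decide)]
                      rw [pvRepl_append_noMatch pvT3 '\u03c3' pvT7 _ (by decide)]
                      rw [pvRepl_append_noMatch pvT4 '\u03a9' pvT7 _ (by decide)]
                      rw [pvRepl_append_noMatch pvT5 '\u00b2' pvT7 _ (by decide)]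
                      rw [pvRepl_append_noMatch pvT6 '\u221a' pvT7 _ (by decide)]
                      rw [pvRepl_head pvT7 '\u03c1' _ (by decide)]
                      rw [pvScan.eq_def]
                      simp [pvMapping, pvT1, pvT2, pvT3, pvT4, pvT5, pvT6, pvT7, List.find?, List.isPrefixOf]
                      exact ih r hr
                    | false =>
                      have P1 : ¬ pvT1 <+: ('{' :: s') := fun hp => absurd (List.isPrefixOf_iff_prefix.mpr hp) (by simp [hb1])
                      have P2 : ¬ pvT2 <+: ('{' :: s') := fun hp => absurd (List.isPrefixOf_iff_prefix.mpr hp) (by simp [hb2])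
                      have P3 : ¬ pvT3 <+: ('{' :: s') := fun hp => absurd (List.isPrefixOf_iff_prefix.mpr hp) (by simp [hb3])
                      have P4 : ¬ pvT4 <+: ('{' :: s') := fun hp => absurd (List.isPrefixOf_iff_prefix.mpr hp) (by simp [hb4])
                      have P5 : ¬ pvT5 <+: ('{' :: s') := fun hp => absurd (List.isPrefixOf_iff_prefix.mpr hp) (by simp [hb5])
                      have P6 : ¬ pvT6 <+: ('{' :: s') := fun hp => absurd (List.isPrefixOf_iff_prefix.mpr hp) (by simp [hb6])
                      have P7 : ¬ pvT7 <+: ('{' :: s') := fun hp => absurd (List.isPrefixOf_iff_prefix.mpr hp) (by simp [hb7])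
                      have Q2 : ¬ pvT2 <+: ('{' :: pvRepl pvT1 '\u00b5' (s')) := pvNotPre_lift pvT1 '\u00b5' pvT2 '{' (s') (P2) (by decide)
                      have Q3 : ¬ pvT3 <+: ('{' :: pvRepl pvT2 '\u00b0' (pvRepl pvT1 '\u00b5' (s'))) := pvNotPre_lift pvT2 '\u00b0' pvT3 '{' (pvRepl pvT1 '\u00b5' (s')) (pvNotPre_lift pvT1 '\u00b5' pvT3 '{' (s') (P3) (by decide)) (by decide)
                      have Q4 : ¬ pvT4 <+: ('{' :: pvRepl pvT3 '\u03c3' (pvRepl pvT2 '\u00b0' (pvRepl pvT1 '\u00b5' (s')))) := pvNotPre_lift pvT3 '\u03c3' pvT4 '{' (pvRepl pvT2 '\u00b0' (pvRepl pvT1 '\u00b5' (s'))) (pvNotPre_lift pvT2 '\u00b0' pvT4 '{' (pvRepl pvT1 '\u00b5' (s')) (pvNotPre_lift pvT1 '\u00b5' pvT4 '{' (s') (P4) (by decide)) (by decide)) (by decide)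
                      have Q5 : ¬ pvT5 <+: ('{' :: pvRepl pvT4 '\u03a9' (pvRepl pvT3 '\u03c3' (pvRepl pvT2 '\u00b0' (pvRepl pvT1 '\u00b5' (s'))))) := pvNotPre_lift pvT4 '\u03a9' pvT5 '{' (pvRepl pvT3 '\u03c3' (pvRepl pvT2 '\u00b0' (pvRepl pvT1 '\u00b5' (s')))) (pvNotPre_lift pvT3 '\u03c3' pvT5 '{' (pvRepl pvT2 '\u00b0' (pvRepl pvT1 '\u00b5' (s'))) (pvNotPre_lift pvT2 '\u00b0' pvT5 '{' (pvRepl pvT1 '\u00b5' (s')) (pvNotPre_lift pvT1 '\u00b5' pvT5 '{' (s') (P5) (by decide)) (by decide)) (by decide)) (by decide)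
                      have Q6 : ¬ pvT6 <+: ('{' :: pvRepl pvT5 '\u00b2' (pvRepl pvT4 '\u03a9' (pvRepl pvT3 '\u03c3' (pvRepl pvT2 '\u00b0' (pvRepl pvT1 '\u00b5' (s')))))) := pvNotPre_lift pvT5 '\u00b2' pvT6 '{' (pvRepl pvT4 '\u03a9' (pvRepl pvT3 '\u03c3' (pvRepl pvT2 '\u00b0' (pvRepl pvT1 '\u00b5' (s'))))) (pvNotPre_lift pvT4 '\u03a9' pvT6 '{' (pvRepl pvT3 '\u03c3' (pvRepl pvT2 '\u00b0' (pvRepl pvT1 '\u00b5' (s')))) (pvNotPre_lift pvT3 '\u03c3' pvT6 '{' (pvRepl pvT2 '\u00b0' (pvRepl pvT1 '\u00b5' (s'))) (pvNotPre_lift pvT2 '\u00b0' pvT6 '{' (pvRepl pvT1 '\u00b5' (s')) (pvNotPre_lift pvT1 '\u00b5' pvT6 '{' (s') (P6) (by decide)) (by decide)) (by decide)) (by decide)) (by decide)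
                      have Q7 : ¬ pvT7 <+: ('{' :: pvRepl pvT6 '\u221a' (pvRepl pvT5 '\u00b2' (pvRepl pvT4 '\u03a9' (pvRepl pvT3 '\u03c3' (pvRepl pvT2 '\u00b0' (pvRepl pvT1 '\u00b5' (s'))))))) := pvNotPre_lift pvT6 '\u221a' pvT7 '{' (pvRepl pvT5 '\u00b2' (pvRepl pvT4 '\u03a9' (pvRepl pvT3 '\u03c3' (pvRepl pvT2 '\u00b0' (pvRepl pvT1 '\u00b5' (s')))))) (pvNotPre_lift pvT5 '\u00b2' pvT7 '{' (pvRepl pvT4 '\u03a9' (pvRepl pvT3 '\u03c3' (pvRepl pvT2 '\u00b0' (pvRepl pvT1 '\u00b5' (s'))))) (pvNotPre_lift pvT4 '\u03a9' pvT7 '{' (pvRepl pvT3 '\u03c3' (pvRepl pvT2 '\u00b0' (pvRepl pvT1 '\u00b5' (s')))) (pvNotPre_lift pvT3 '\u03c3' pvT7 '{' (pvRepl pvT2 '\u00b0' (pvRepl pvT1 '\u00b5' (s'))) (pvNotPre_lift pvT2 '\u00b0' pvT7 '{' (pvRepl pvT1 '\u00b5' (s')) (pvNotPre_lift pvT1 '\u00b5'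 pvT7 '{' (s') (P7) (by decide)) (by decide)) (by decide)) (by decide)) (by decide)) (by decide)
                      simp only [pvF]
                      rw [pvRepl_cons_neg pvT1 '\u00b5' '{' s' hb1]
                      rw [pvRepl_cons_neg pvT2 '\u00b0' '{' _ (Bool.eq_false_iff.mpr (fun hbt => Q2 (List.isPrefixOf_iff_prefix.mp hbt)))]
                      rw [pvRepl_cons_neg pvT3 '\u03c3' '{' _ (Bool.eq_false_iff.mpr (fun hbt => Q3 (List.isPrefixOf_iff_prefix.mp hbt)))]
                      rw [pvRepl_cons_neg pvT4 '\u03a9' '{' _ (Bool.eq_false_iff.mpr (fun hbt => Q4 (List.isPrefixOf_iff_prefix.mp hbt)))]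
                      rw [pvRepl_cons_neg pvT5 '\u00b2' '{' _ (Bool.eq_false_iff.mpr (fun hbt => Q5 (List.isPrefixOf_iff_prefix.mp hbt)))]
                      rw [pvRepl_cons_neg pvT6 '\u221a' '{' _ (Bool.eq_false_iff.mpr (fun hbt => Q6 (List.isPrefixOf_iff_prefix.mp hbt)))]
                      rw [pvRepl_cons_neg pvT7 '\u03c1' '{' _ (Bool.eq_false_iff.mpr (fun hbt => Q7 (List.isPrefixOf_iff_prefix.mp hbt)))]
                      rw [pvScan.eq_def]
                      simp [pvMapping, List.find?, hb1, hb2, hb3, hb4, hb5, hb6, hb7]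
                      exact ih s' hs'
      · simp only [pvF]
        rw [pvRepl_cons_ne pvT1 '\u00b5' c _ (by decide) hc]
        rw [pvRepl_cons_ne pvT2 '\u00b0' c _ (by decide) hc]
        rw [pvRepl_cons_ne pvT3 '\u03c3' c _ (by decide) hc]
        rw [pvRepl_cons_ne pvT4 '\u03a9' c _ (by decide) hc]
        rw [pvRepl_cons_ne pvT5 '\u00b2' c _ (by decide) hc]
        rw [pvRepl_cons_ne pvT6 '\u221a' c _ (by decide) hc]
        rw [pvRepl_cons_ne pvT7 '\u03c1' c _ (by decide) hc]
        rw [pvScan.eq_def]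
        simp [hc]
        exact ih s' hs'


-- A's guarded replace step and loop body (proof-side abbreviations)
def pvAStep (t uS s : String) : String :=
  if PySem.Str.isIn t s then PySem.Str.replace s t uS else s

def pvAF (st : String × Int) (item : String) : String × Int :=
  (if PySem.Str.isIn item st.1 then
      PySem.Str.replace st.1 item
        ((PySem.List.pyGet? ["\u00b5", "\u00b0", "\u03c3", "\u03a9", "\u00b2", "\u221a", "\u03c1"] st.2).getD "")
    else st.1, st.2 + 1)

theorem pvS1 (X : String) : pvAF (X, (0 : Int)) "{micro}" = (pvAStep "{micro}" "\u00b5" X, 1) := rfl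

theorem pvS2 (X : String) : pvAF (X, (1 : Int)) "{degrees}" = (pvAStep "{degrees}" "\u00b0" X, 2) := rfl

theorem pvS3 (X : String) : pvAF (X, (2 : Int)) "{sigma}" = (pvAStep "{sigma}" "\u03c3" X, 3) := rfl

theorem pvS4 (X : String) : pvAF (X, (3 : Int)) "{ohms}" = (pvAStep "{ohms}" "\u03a9" X, 4) := rfl

theorem pvS5 (X : String) : pvAF (X, (4 : Int)) "{squared}" = (pvAStep "{squared}" "\u00b2" X, 5) := rfl

theorem pvS6 (X : String) : pvAF (X, (5 : Int)) "{sqrt}" = (pvAStep "{sqrt}" "\u221a" X, 6) := rfl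

theorem pvS7 (X : String) : pvAF (X, (6 : Int)) "{rho}" = (pvAStep "{rho}" "\u03c1" X, 7) := rfl

theorem pvAfold (X : String) :
    (List.foldl pvAF (X, (0 : Int)) ["{micro}", "{degrees}", "{sigma}", "{ohms}", "{squared}", "{sqrt}", "{rho}"]).1
      = pvAStep "{rho}" "\u03c1" (pvAStep "{sqrt}" "\u221a" (pvAStep "{squared}" "\u00b2" (pvAStep "{ohms}" "\u03a9" (pvAStep "{sigma}" "\u03c3" (pvAStep "{degrees}" "\u00b0" (pvAStep "{micro}" "\u00b5" X)))))) := by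
  rw [List.foldl_cons, pvS1, List.foldl_cons, pvS2, List.foldl_cons, pvS3, List.foldl_cons,
      pvS4, List.foldl_cons, pvS5, List.foldl_cons, pvS6, List.foldl_cons, pvS7, List.foldl_nil]

theorem pvStep_toList (s t uS : String) (u : Char) (ht : t.toList ≠ []) (hu : uS.toList = [u]) :
    (pvAStep t uS s).toList = pvRepl t.toList u s.toList := by
  unfold pvAStep
  cases h : PySem.Str.isIn t s with
  | true =>
    simp only [h, if_pos, PySem.Str.toList_replace, hu]
    exact pvReplace_eq t.toList ht u s.toList
  | false =>
    have hni : ¬ t.toList <:+: s.toList := by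
      intro hi
      rw [(by simpa [PySem.Chars.isIn_iff_infix] using hi : PySem.Str.isIn t s = true)] at h
      simp at h
    simp only [h, Bool.false_eq_true, if_false]
    exact (pvRepl_of_not_infix t.toList u s.toList hni).symm

theorem pvStepA1 (s : String) : (pvAStep "{micro}" "\u00b5" s).toList = pvRepl pvT1 '\u00b5' s.toList := by
  have h := pvStep_toList s "{micro}" "\u00b5" '\u00b5' (by decide) (by decide)
  rw [show ("{micro}".toList) = pvT1 from by decide] at h
  exact h

theorem pvStepA2 (s : String) : (pvAStep "{degrees}" "\u00b0" s).toList = pvRepl pvT2 '\u00b0' s.toList := by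
  have h := pvStep_toList s "{degrees}" "\u00b0" '\u00b0' (by decide) (by decide)
  rw [show ("{degrees}".toList) = pvT2 from by decide] at h
  exact h

theorem pvStepA3 (s : String) : (pvAStep "{sigma}" "\u03c3" s).toList = pvRepl pvT3 '\u03c3' s.toList := by
  have h := pvStep_toList s "{sigma}" "\u03c3" '\u03c3' (by decide) (by decide)
  rw [show ("{sigma}".toList) = pvT3 from by decide] at h
  exact h

theorem pvStepA4 (s : String) : (pvAStep "{ohms}" "\u03a9" s).toList = pvRepl pvT4 '\u03a9' s.toList := by
  have h := pvStep_toList s "{ohms}" "\u03a9" '\u03a9' (by decide) (by decide)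
  rw [show ("{ohms}".toList) = pvT4 from by decide] at h
  exact h

theorem pvStepA5 (s : String) : (pvAStep "{squared}" "\u00b2" s).toList = pvRepl pvT5 '\u00b2' s.toList := by
  have h := pvStep_toList s "{squared}" "\u00b2" '\u00b2' (by decide) (by decide)
  rw [show ("{squared}".toList) = pvT5 from by decide] at h
  exact h

theorem pvStepA6 (s : String) : (pvAStep "{sqrt}" "\u221a" s).toList = pvRepl pvT6 '\u221a' s.toList := by
  have h := pvStep_toList s "{sqrt}" "\u221a" '\u221a' (by decide) (by decide)
  rw [show ("{sqrt}".toList) = pvT6 from by decide] at h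
  exact h

theorem pvStepA7 (s : String) : (pvAStep "{rho}" "\u03c1" s).toList = pvRepl pvT7 '\u03c1' s.toList := by
  have h := pvStep_toList s "{rho}" "\u03c1" '\u03c1' (by decide) (by decide)
  rw [show ("{rho}".toList) = pvT7 from by decide] at h
  exact h

-- ===== VERDICT (by name: the statement is the Claim_ definition above) =====
theorem specchar_sub_spec : Claim_equal_specchar_sub := by
  unfold Claim_equal_specchar_sub Spec_specchar_sub
  intro string _
  have hf : specchar_sub string
      = (if PySem.Str.isIn "{" string = false then string
         else (List.foldl pvAF (string, (0 : Int))

           ["{micro}", "{degrees}", "{sigma}", "{ohms}", "{squared}", "{sqrt}", "{rho}"]).1) := rfl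
  rw [hf]
  unfold specchar_sub_alt
  cases hg : PySem.Str.isIn "{" string with
  | false => simp [hg]
  | true =>
    rw [if_neg (by simp [hg]), if_neg (by simp [hg]), pvAfold]
    apply String.toList_inj.mp
    rw [pvStepA7, pvStepA6, pvStepA5, pvStepA4, pvStepA3, pvStepA2, pvStepA1,
        String.toList_ofList]
    exact pvMain string.toList.length string.toList le_rfl
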